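-- pv_equiv track=rewrite | github.com/omarkhan1/ProofPlus | email_feature/sender.py | get_surah_and_verse
-- ===== SOURCE A (Python) =====
-- def get_surah_and_verse(label):
--     chapter_start_loc = [0, 7, 293, 493, 669, 789, 954, 1160, 1235, 1364, 1473,
--                          1596, 1707, 1750, 1802, 1901, 2029, 2140, 2250, 2348,
--                          2483, 2595, 2673, 2791, 2855, 2932, 3159, 3252, 3340,
--                          3409, 3469, 3503, 3533, 3606, 3660, 3705, 3788, 3970,
--                          4058, 4133, 4218, 4272, 4325, 4414, 4473, 4510, 4545,
--                          4583, 4612, 4630, 4675, 4735, 4784, 4846, 4901, 4979,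
--                          5075, 5104, 5126, 5150, 5163, 5177, 5188, 5199, 5217,
--                          5229, 5241, 5271, 5323, 5375, 5419, 5447, 5475, 5495,
--                          5551, 5591, 5622, 5672, 5712, 5758, 5800, 5829, 5848,
--                          5884, 5909, 5931,  5948, 5967, 5993, 6023, 6043, 6058,
--                          6079, 6090, 6098, 6106, 6125, 6130, 6138, 6146, 6157,
--                          6168, 6176, 6179, 6188, 6193, 6197, 6204, 6207, 6213,
--                          6216, 6221, 6225, 6230, 6236]
--
--     for i in range(114):
--         if chapter_start_loc[i] <= label and chapter_start_loc[i+1] > label: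
--             surah = i + 1
--             verse = label - chapter_start_loc[i] + 1
--             return (int(surah), int(verse))
-- ===== SOURCE B (Python) =====
-- def get_surah_and_verse(label):
--     # number of verses in each of the 114 surahs
--     verse_counts = [7, 286, 200, 176, 120, 165, 206, 75, 129, 109, 123, 111,
--                     43, 52, 99, 128, 111, 110, 98, 135, 112, 78, 118, 64, 77,
--                     227, 93, 88, 69, 60, 34, 30, 73, 54, 45, 83, 182, 88, 75,
--                     85, 54, 53, 89, 59, 37, 35, 38, 29, 18, 45, 60, 49, 62,
--                     55, 78, 96, 29, 22, 24, 13, 14, 11, 11, 18, 12, 12, 30,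
--                     52, 52, 44, 28, 28, 20, 56, 40, 31, 50, 40, 46, 42, 29,
--                     19, 36, 25, 22, 17, 19, 26, 30, 20, 15, 21, 11, 8, 8, 19,
--                     5, 8, 8, 11, 11, 8, 3, 9, 5, 4, 7, 3, 6, 3, 5, 4, 5, 6]
--     if label < 0:
--         return None
--     remaining = label
--     surah = 1
--     for count in verse_counts:
--         if remaining < count:
--             return (surah, int(remaining) + 1)
--         remaining -= count
--         surah += 1
--     return None
-- ===== Notes on version B (the rewrite author's own statement) =====
-- stated objective: alternative
-- what changed: Replaces the cumulative-boundary table scanned by index pairs with a per-surah verse-count list walked once while subtracting counts from the label; the index arithmetic over adjacent table entries disappears.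
import Mathlib
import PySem

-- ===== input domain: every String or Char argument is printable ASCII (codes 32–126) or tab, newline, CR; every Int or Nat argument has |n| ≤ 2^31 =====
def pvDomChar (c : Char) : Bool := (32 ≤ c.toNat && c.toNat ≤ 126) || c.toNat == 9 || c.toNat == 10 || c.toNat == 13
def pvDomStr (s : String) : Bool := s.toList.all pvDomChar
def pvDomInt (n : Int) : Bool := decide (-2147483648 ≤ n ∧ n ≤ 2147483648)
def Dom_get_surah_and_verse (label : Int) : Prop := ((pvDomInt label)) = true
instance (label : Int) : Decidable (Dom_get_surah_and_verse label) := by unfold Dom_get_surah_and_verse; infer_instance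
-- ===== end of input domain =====

-- B trades A's cumulative-boundary table (scanned by adjacent index pairs) for a per-surah
-- verse-count list walked once while subtracting counts from the label: a different data
-- representation and loop, same cost.

-- ===== PORT A =====
-- A's chapter_start_loc table of cumulative verse boundaries
def pvTbl : List Int := [0, 7, 293, 493, 669, 789, 954, 1160, 1235, 1364, 1473,
  1596, 1707, 1750, 1802, 1901, 2029, 2140, 2250, 2348,
  2483, 2595, 2673, 2791, 2855, 2932, 3159, 3252, 3340,
  3409, 3469, 3503, 3533, 3606, 3660, 3705, 3788, 3970,
  4058, 4133, 4218, 4272, 4325, 4414, 4473, 4510, 4545,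
  4583, 4612, 4630, 4675, 4735, 4784, 4846, 4901, 4979,
  5075, 5104, 5126, 5150, 5163, 5177, 5188, 5199, 5217,
  5229, 5241, 5271, 5323, 5375, 5419, 5447, 5475, 5495,
  5551, 5591, 5622, 5672, 5712, 5758, 5800, 5829, 5848,
  5884, 5909, 5931, 5948, 5967, 5993, 6023, 6043, 6058,
  6079, 6090, 6098, 6106, 6125, 6130, 6138, 6146, 6157,
  6168, 6176, 6179, 6188, 6193, 6197, 6204, 6207, 6213,
  6216, 6221, 6225, 6230, 6236]

-- A's `for i in range(114)` loop with early return; indices i, i+1 are always in range 0..114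
def pvLoopA (label : Int) (i : Nat) : Option (Int × Int) :=
  if _h : i < 114 then
    if pvTbl.getD i 0 ≤ label ∧ pvTbl.getD (i + 1) 0 > label then
      some ((i : Int) + 1, label - pvTbl.getD i 0 + 1)
    else pvLoopA label (i + 1)
  else none
termination_by 114 - i

def get_surah_and_verse (label : Int) : Option (Int × Int) := pvLoopA label 0

-- ===== PORT B =====
-- Source B's verse_counts: the number of verses in each of the 114 surahs
def pvCounts : List Int := [7, 286, 200, 176, 120, 165, 206, 75, 129, 109, 123, 111,
  43, 52, 99, 128, 111, 110, 98, 135, 112, 78, 118, 64, 77,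
  227, 93, 88, 69, 60, 34, 30, 73, 54, 45, 83, 182, 88, 75,
  85, 54, 53, 89, 59, 37, 35, 38, 29, 18, 45, 60, 49, 62,
  55, 78, 96, 29, 22, 24, 13, 14, 11, 11, 18, 12, 12, 30,
  52, 52, 44, 28, 28, 20, 56, 40, 31, 50, 40, 46, 42, 29,
  19, 36, 25, 22, 17, 19, 26, 30, 20, 15, 21, 11, 8, 8, 19,
  5, 8, 8, 11, 11, 8, 3, 9, 5, 4, 7, 3, 6, 3, 5, 4, 5, 6]

-- Source B's `for count in verse_counts` loop carrying (remaining, surah)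
def pvLoopB (remaining surah : Int) : List Int → Option (Int × Int)
  | [] => none
  | count :: rest =>
    if remaining < count then some (surah, remaining + 1)
    else pvLoopB (remaining - count) (surah + 1) rest

def get_surah_and_verse_alt (label : Int) : Option (Int × Int) :=
  if label < 0 then none
  else pvLoopB label 1 pvCounts

-- ===== PRECONDITION & SPEC =====
def Spec_get_surah_and_verse (label : Int) (out : Option (Int × Int)) : Prop := out = get_surah_and_verse_alt label
instance (label : Int) (out : Option (Int × Int)) : Decidable (Spec_get_surah_and_verse label out) := by unfold Spec_get_surah_and_verse; infer_instance

-- ===== CLAIM (what is proved, stated in full; the proofs are below) =====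
def Claim_equal_get_surah_and_verse : Prop := ∀ (label : Int), Dom_get_surah_and_verse label → Spec_get_surah_and_verse label (get_surah_and_verse label)

-- ===== LEMMAS AND PROOFS =====

theorem tbl_nonneg : ∀ i : Fin 115, 0 ≤ pvTbl.getD i.val 0 := by decide

theorem counts_len : pvCounts.length = 114 := by decide

-- count i = boundary (i+1) - boundary i
theorem counts_diff : ∀ i : Fin 114, pvCounts.getD i.val 0 = pvTbl.getD (i.val + 1) 0 - pvTbl.getD i.val 0 := by decide

theorem counts_drop_cons (i : Nat) (h : i < 114) :
    pvCounts.drop i = pvCounts.getD i 0 :: pvCounts.drop (i + 1) := by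
  have hl : i < pvCounts.length := by rw [counts_len]; exact h
  rw [List.drop_eq_getElem_cons hl, List.getD_eq_getElem pvCounts 0 hl]

theorem counts_drop_114 : pvCounts.drop 114 = [] := by decide

-- A returns none for negative labels (all boundaries are nonnegative)
theorem loopA_neg (label : Int) (hneg : label < 0) :
    ∀ n i, 114 - i ≤ n → pvLoopA label i = none := by
  intro n
  induction n with
  | zero =>
    intro i hn
    rw [pvLoopA]; simp only [dif_neg (by omega : ¬ i < 114)]
  | succ m ih =>
    intro i hn
    rw [pvLoopA]
    by_cases h : i < 114
    · simp only [dif_pos h]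
      rw [if_neg (by
        intro ⟨h1, _⟩
        have := tbl_nonneg ⟨i, by omega⟩
        simp only at this
        omega)]
      exact ih (i + 1) (by omega)
    · simp only [dif_neg h]

-- the bridge: B's subtract-walk on the suffix of counts equals A's boundary scan from index i
theorem loopB_eq_loopA (label : Int) :
    ∀ n i, 114 - i ≤ n → i ≤ 114 → pvTbl.getD i 0 ≤ label →
    pvLoopB (label - pvTbl.getD i 0) ((i : Int) + 1) (pvCounts.drop i) = pvLoopA label i := by
  intro n
  induction n with
  | zero =>
    intro i hn hi _
    have : i = 114 := by omega
    subst this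
    rw [counts_drop_114, pvLoopB, pvLoopA]
    simp only [dif_neg (by omega : ¬ (114:Nat) < 114)]
  | succ m ih =>
    intro i hn hi hle
    by_cases h : i < 114
    · rw [counts_drop_cons i h, pvLoopB]
      have hd := counts_diff ⟨i, h⟩
      simp only at hd
      rw [pvLoopA]
      simp only [dif_pos h]
      by_cases hc : label - pvTbl.getD i 0 < pvCounts.getD i 0
      · rw [if_pos hc, if_pos (by constructor <;> omega)]
      · rw [if_neg hc, if_neg (by intro ⟨_, h2⟩; omega)]
        have hstep : label - pvTbl.getD i 0 - pvCounts.getD i 0 = label - pvTbl.getD (i + 1) 0 := by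
          omega
        have hcast : (i : Int) + 1 + 1 = ((i + 1 : Nat) : Int) + 1 := by push_cast; ring
        rw [hstep, hcast]
        exact ih (i + 1) (by omega) (by omega) (by omega)
    · have : i = 114 := by omega
      subst this
      rw [counts_drop_114, pvLoopB, pvLoopA]
      simp only [dif_neg (by omega : ¬ (114:Nat) < 114)]

-- ===== VERDICT (by name: the statement is the Claim_ definition above) =====
theorem get_surah_and_verse_spec : Claim_equal_get_surah_and_verse := by
  intro label _
  unfold Spec_get_surah_and_verse get_surah_and_verse get_surah_and_verse_alt
  by_cases hneg : label < 0
  · rw [if_pos hneg, loopA_neg label hneg 114 0 (by omega)]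
  · rw [if_neg hneg]
    have h0 : pvTbl.getD 0 0 = 0 := by decide
    have := loopB_eq_loopA label 114 0 (by omega) (by omega) (by rw [h0]; omega)
    rw [h0] at this
    simpa using this.symm
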